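-- pv_equiv track=rewrite | github.com/SamKry/adventofcode2024 | python/22/algo2.py | findPatterns
-- ===== SOURCE A (Python) =====
-- from collections import defaultdict
-- from itertools import pairwise
--
-- def getOnesDigit(secretnumber):
--     return secretnumber % 10
--
-- def findPatterns(seeds):
--     pattern_scores = defaultdict(int)
--
--     for seed in seeds:
--         seen_patterns = set()
--         prices = []
--         for s in seed:
--             prices.append(getOnesDigit(s))
--
--         deltas = []
--         for a, b in pairwise(prices):
--             deltas.append(b - a)
--
--         for i, quad in enumerate(
--             zip(deltas, deltas[1:], deltas[2:], deltas[3:]), start=4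
--         ):
--             if quad not in seen_patterns:
--                 pattern_scores[quad] += prices[i]
--                 seen_patterns.add(quad)
--
--     return max(pattern_scores.values(), default=0)
-- ===== SOURCE B (Python) =====
-- from collections import defaultdict
--
--
-- def findPatterns(seeds):
--     # One streaming pass per seed: shift-register of the last four deltas,
--     # no intermediate prices/deltas lists.
--     pattern_scores = defaultdict(int)
--
--     for seed in seeds:
--         seen_patterns = set()
--         prev = d1 = d2 = d3 = d4 = None
--         for s in seed:
--             digit = s % 10
--             if prev is not None:
--                 d1, d2, d3, d4 = d2, d3, d4, digit - prev
--                 if d1 is not None: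
--                     quad = (d1, d2, d3, d4)
--                     if quad not in seen_patterns:
--                         pattern_scores[quad] += digit
--                         seen_patterns.add(quad)
--             prev = digit
--         # (d1..d4 reset per seed above)
--
--     return max(pattern_scores.values(), default=0)
-- ===== Notes on version B (the rewrite author's own statement) =====
-- stated objective: simpler
-- what changed: Replaces A's three-phase pipeline per seed (build the prices list, build the deltas list, then slide zip(deltas, deltas[1:], deltas[2:], deltas[3:]) with enumerate-indexed lookups back into prices) by a single streaming pass per seed that keeps only the previous digit and a shift register of the last four deltas, allocating no intermediate lists.
import Mathlib
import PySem

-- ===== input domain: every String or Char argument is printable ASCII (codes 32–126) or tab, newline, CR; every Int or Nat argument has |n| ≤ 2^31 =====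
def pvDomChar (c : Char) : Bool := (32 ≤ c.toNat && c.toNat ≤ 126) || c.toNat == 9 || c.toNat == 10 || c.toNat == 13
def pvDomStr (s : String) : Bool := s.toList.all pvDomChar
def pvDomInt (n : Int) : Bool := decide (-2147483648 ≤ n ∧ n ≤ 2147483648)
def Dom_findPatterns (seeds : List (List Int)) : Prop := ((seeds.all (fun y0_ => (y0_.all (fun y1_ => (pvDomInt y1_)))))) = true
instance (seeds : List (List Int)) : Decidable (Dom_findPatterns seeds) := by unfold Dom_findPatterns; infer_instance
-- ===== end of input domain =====

-- B replaces A's build-prices/build-deltas/slide-over-slices pipeline by a single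
-- streaming pass per seed (shift register of the last four deltas); objective: simpler.

-- ===== PORT A =====
def getOnesDigit (s : Int) : Int := PySem.Int.mod s 10

def findPatterns (seeds : List (List Int)) : Int :=
  let pattern_scores : PySem.Dict (Int × Int × Int × Int) Int :=
    seeds.foldl (fun pattern_scores seed =>
      let seen_patterns : PySem.Set (Int × Int × Int × Int) := PySem.Set.empty
      let prices : List Int := seed.foldl (fun prices s => prices ++ [getOnesDigit s]) []
      let deltas : List Int :=
        (prices.zip (prices.drop 1)).foldl (fun deltas ab => deltas ++ [ab.2 - ab.1]) []
      let quads := deltas.zip ((deltas.drop 1).zip ((deltas.drop 2).zip (deltas.drop 3)))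
      ((PySem.List.enumerate quads 4).foldl
        (fun st iq =>
          if st.1.contains iq.2 then st
          else (st.1.add iq.2,
                st.2.modify iq.2 0 (· + PySem.List.pyGetD prices iq.1 0)))
        (seen_patterns, pattern_scores)).2) PySem.Dict.empty
  PySem.List.maxD pattern_scores.values (fun x => x) 0

-- ===== PORT B =====
-- one streaming step: state = ((prev, d1, d2, d3, d4), seen_patterns, pattern_scores)
def altStep
    (st : (Option Int × Option Int × Option Int × Option Int × Option Int) ×
          PySem.Set (Int × Int × Int × Int) × PySem.Dict (Int × Int × Int × Int) Int)
    (s : Int) :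
    (Option Int × Option Int × Option Int × Option Int × Option Int) ×
    PySem.Set (Int × Int × Int × Int) × PySem.Dict (Int × Int × Int × Int) Int :=
  let digit := PySem.Int.mod s 10
  match st with
  | ((prev, _d1, d2, d3, d4), seen, dict) =>
    match prev with
    | none => ((some digit, _d1, d2, d3, d4), seen, dict)
    | some pv =>
      let dlt := digit - pv
      let regs := (some digit, d2, d3, d4, some dlt)
      match d2, d3, d4 with
      | some a, some b, some c =>
        let quad := (a, b, c, dlt)
        if seen.contains quad then (regs, seen, dict)
        else (regs, seen.add quad, dict.modify quad 0 (· + digit))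
      | _, _, _ => (regs, seen, dict)

def findPatterns_alt (seeds : List (List Int)) : Int :=
  let pattern_scores : PySem.Dict (Int × Int × Int × Int) Int :=
    seeds.foldl (fun pattern_scores seed =>
      (seed.foldl altStep ((none, none, none, none, none), PySem.Set.empty, pattern_scores)).2.2)
      PySem.Dict.empty
  PySem.List.maxD pattern_scores.values (fun x => x) 0

-- ===== PRECONDITION & SPEC =====
def Spec_findPatterns (seeds : List (List Int)) (out : Int) : Prop := out = findPatterns_alt seeds
instance (seeds : List (List Int)) (out : Int) : Decidable (Spec_findPatterns seeds out) := by unfold Spec_findPatterns; infer_instance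

-- ===== CLAIM (what is proved, stated in full; the proofs are below) =====
def Claim_equal_findPatterns : Prop := ∀ (seeds : List (List Int)), Dom_findPatterns seeds → Spec_findPatterns seeds (findPatterns seeds)

-- ===== LEMMAS AND PROOFS =====
def pricesOf (seed : List Int) : List Int := seed.map (fun s => PySem.Int.mod s 10)

def deltasOf (ps : List Int) : List Int := (ps.zip (ps.drop 1)).map (fun ab => ab.2 - ab.1)

def quadsOf (l : List Int) : List (Int × Int × Int × Int) :=
  l.zip ((l.drop 1).zip ((l.drop 2).zip (l.drop 3)))

def evOf (ps : List Int) : List ((Int × Int × Int × Int) × Int) :=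
  (PySem.List.enumerate (quadsOf (deltasOf ps)) 4).map
    (fun iq => (iq.2, PySem.List.pyGetD ps iq.1 0))

def evStep
    (st : PySem.Set (Int × Int × Int × Int) × PySem.Dict (Int × Int × Int × Int) Int)
    (qp : (Int × Int × Int × Int) × Int) :
    PySem.Set (Int × Int × Int × Int) × PySem.Dict (Int × Int × Int × Int) Int :=
  if st.1.contains qp.1 then st else (st.1.add qp.1, st.2.modify qp.1 0 (· + qp.2))

lemma length_deltasOf (ps : List Int) : (deltasOf ps).length = ps.length - 1 := by
  simp [deltasOf]

lemma deltasOf_append (ps : List Int) (p : Int) (h : ps ≠ []) :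
    deltasOf (ps ++ [p]) = deltasOf ps ++ [p - ps.getLast h] := by
  induction ps with
  | nil => simp at h
  | cons a t ih =>
    cases t with
    | nil => simp [deltasOf]
    | cons b u =>
      have h2 : (b :: u) ≠ [] := by simp
      have := ih h2
      simp only [deltasOf, List.cons_append, List.drop_one] at this ⊢
      simp only [List.tail_cons, List.zip_cons_cons, List.map_cons]
      rw [List.getLast_cons h2] at *
      simp_all [deltasOf]

lemma length_quadsOf (l : List Int) : (quadsOf l).length = l.length - 3 := by
  simp [quadsOf]; omega

lemma getElem_quadsOf (l : List Int) (j : Nat) (h : j < (quadsOf l).length) :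
    (quadsOf l)[j] =
      (l[j]'(by simp [length_quadsOf] at h; omega),
       l[j+1]'(by simp [length_quadsOf] at h; omega),
       l[j+2]'(by simp [length_quadsOf] at h; omega),
       l[j+3]'(by simp [length_quadsOf] at h; omega)) := by
  simp [quadsOf, List.getElem_zip, List.getElem_drop, Nat.add_comm]

lemma quadsOf_append (l : List Int) (x : Int) :
    quadsOf (l ++ [x]) = quadsOf l ++
      (if 3 ≤ l.length then
        [(l.getD (l.length - 3) 0, l.getD (l.length - 2) 0, l.getD (l.length - 1) 0, x)]
       else []) := by
  apply List.ext_getElem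
  · simp [length_quadsOf]
    split <;> simp <;> omega
  · intro j h1 h2
    by_cases hj : j < (quadsOf l).length
    · rw [List.getElem_append_left hj, getElem_quadsOf, getElem_quadsOf]
      have hl : j + 3 < l.length := by simp [length_quadsOf] at hj; omega
      simp only [List.getElem_append]
      split_ifs <;> first | rfl | omega
    · have h3 : 3 ≤ l.length := by
        have := h1; simp [length_quadsOf] at this hj; omega
      have hj' : j = l.length - 3 := by
        have := h1; simp [length_quadsOf] at this hj ⊢; omega
      subst hj'
      rw [getElem_quadsOf, List.getElem_append_right (le_of_not_gt hj)]
      simp only [if_pos h3, List.getElem_singleton, Prod.mk.injEq]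
      have e1 : ∀ (i : Nat) (hi : i < (l ++ [x]).length) (h' : i < l.length),
          (l ++ [x])[i]'hi = l.getD i 0 := by
        intro i hi h'; rw [List.getElem_append_left h', List.getD_eq_getElem l 0 h']
      refine ⟨?_, ?_, ?_, ?_⟩
      · rw [e1 _ _ (by omega)]
      · rw [e1 _ _ (by omega)]; congr 1; omega
      · rw [e1 _ _ (by omega)]; congr 1; omega
      · rw [List.getElem_append_right (by omega)]; simp

lemma evOf_append (ps : List Int) (p : Int) (h : ps ≠ []) :
    evOf (ps ++ [p]) = evOf ps ++
      (if 4 ≤ ps.length then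
        [(((deltasOf ps).getD ((deltasOf ps).length - 3) 0,
           (deltasOf ps).getD ((deltasOf ps).length - 2) 0,
           (deltasOf ps).getD ((deltasOf ps).length - 1) 0,
           p - ps.getLast h), p)]
       else []) := by
  have hd : (deltasOf ps).length = ps.length - 1 := length_deltasOf ps
  have hps : 1 ≤ ps.length := by
    cases ps with | nil => simp at h | cons a t => simp
  unfold evOf
  rw [deltasOf_append ps p h, quadsOf_append, PySem.List.enumerate_append, List.map_append]
  congr 1
  · apply List.map_congr_left
    intro iq hiq
    rw [PySem.List.mem_enumerate_iff] at hiq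
    obtain ⟨k, hk, rfl⟩ := hiq
    have hk4 : 4 + k < ps.length := by
      rw [length_quadsOf] at hk; omega
    simp only
    congr 1
    have : (4 : Int) + (k : Int) = ((4 + k : Nat) : Int) := by push_cast; ring
    rw [this, PySem.List.pyGetD_natCast, PySem.List.pyGetD_natCast, List.getD_append _ _ _ _ (by omega)]
  · by_cases h4 : 4 ≤ ps.length
    · rw [if_pos h4, if_pos (by omega : 3 ≤ (deltasOf ps).length)]
      rw [PySem.List.enumerate_cons, PySem.List.enumerate_nil]
      simp only [List.map_cons, List.map_nil]
      congr 1
      congr 1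
      have : (4 : Int) + ((quadsOf (deltasOf ps)).length : Int) = ((ps.length : Nat) : Int) := by
        rw [length_quadsOf]; omega
      rw [this, PySem.List.pyGetD_natCast]
      rw [List.getD_eq_getElem?_getD, List.getElem?_concat_length]
      rfl
    · rw [if_neg h4, if_neg (by omega : ¬ 3 ≤ (deltasOf ps).length)]
      simp

lemma stream_spec (seed : List Int)
    (dict : PySem.Dict (Int × Int × Int × Int) Int) :
    seed.foldl altStep ((none, none, none, none, none), PySem.Set.empty, dict)
    = (((pricesOf seed).getLast?,
        ((deltasOf (pricesOf seed)).reverse)[3]?,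
        ((deltasOf (pricesOf seed)).reverse)[2]?,
        ((deltasOf (pricesOf seed)).reverse)[1]?,
        ((deltasOf (pricesOf seed)).reverse)[0]?),
       (evOf (pricesOf seed)).foldl evStep (PySem.Set.empty, dict)) := by
  induction seed using List.reverseRecOn with
  | nil => rfl
  | append_singleton l s ih =>
    rw [List.foldl_append, ih]
    by_cases hl : l = []
    · subst hl
      rfl
    · have hps : pricesOf l ≠ [] := by simp [pricesOf, hl]
      have hpl : pricesOf (l ++ [s]) = pricesOf l ++ [PySem.Int.mod s 10] := by simp [pricesOf]
      set p := PySem.Int.mod s 10 with hp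
      set ps := pricesOf l with hpsd
      have hgl : ps.getLast? = some (ps.getLast hps) := List.getLast?_eq_some_getLast hps
      have hda : deltasOf (ps ++ [p]) = deltasOf ps ++ [p - ps.getLast hps] := deltasOf_append ps p hps
      have hlen : (deltasOf ps).length = ps.length - 1 := length_deltasOf ps
      rw [hpl, hda, evOf_append ps p hps, hgl]
      simp only [List.reverse_append, List.reverse_cons, List.reverse_nil, List.nil_append,
        List.singleton_append, List.getElem?_cons_succ, List.getElem?_cons_zero]
      rw [List.foldl_cons, List.foldl_nil]
      have hcat : (ps ++ [p]).getLast? = some p := by simp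
      rw [hcat]
      set d := deltasOf ps with hdd
      set r := d.reverse with hrd
      have hrl : r.length = d.length := by simp [hrd]
      by_cases h4 : 4 ≤ ps.length
      · have h3 : 3 ≤ d.length := by omega
        have hr2 : r[2]? = some (d.getD (d.length - 3) 0) := by
          rw [hrd, List.getElem?_reverse (by omega),
              show d.length - 1 - 2 = d.length - 3 from by omega,
              List.getElem?_eq_getElem (by omega : d.length - 3 < d.length),
              List.getD_eq_getElem d 0 (by omega)]
        have hr1 : r[1]? = some (d.getD (d.length - 2) 0) := by
          rw [hrd, List.getElem?_reverse (by omega),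
              show d.length - 1 - 1 = d.length - 2 from by omega,
              List.getElem?_eq_getElem (by omega : d.length - 2 < d.length),
              List.getD_eq_getElem d 0 (by omega)]
        have hr0 : r[0]? = some (d.getD (d.length - 1) 0) := by
          rw [hrd, List.getElem?_reverse (by omega),
              show d.length - 1 - 0 = d.length - 1 from by omega,
              List.getElem?_eq_getElem (by omega : d.length - 1 < d.length),
              List.getD_eq_getElem d 0 (by omega)]
        rw [hr2, hr1, hr0, if_pos h4, List.foldl_append, List.foldl_cons, List.foldl_nil]
        simp only [altStep, evStep]
        split_ifs <;> rfl
      · have h2 : r[2]? = none := List.getElem?_eq_none (by omega)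
        rw [h2, if_neg h4, List.append_nil]
        rcases h1 : r[1]? with _ | b1 <;> rcases h0 : r[0]? with _ | b0 <;>
          simp only [altStep] <;> rfl

lemma A_core (seeds : List (List Int)) :
    findPatterns seeds =
      PySem.List.maxD
        ((seeds.foldl
          (fun dict seed => ((evOf (pricesOf seed)).foldl evStep (PySem.Set.empty, dict)).2)
          PySem.Dict.empty).values)
        (fun x => x) 0 := by
  unfold findPatterns
  simp only [PySem.List.foldl_append_singleton_eq_map, List.nil_append, evOf, List.foldl_map]
  rfl

lemma B_core (seeds : List (List Int)) :
    findPatterns_alt seeds =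
      PySem.List.maxD
        ((seeds.foldl
          (fun dict seed => ((evOf (pricesOf seed)).foldl evStep (PySem.Set.empty, dict)).2)
          PySem.Dict.empty).values)
        (fun x => x) 0 := by
  unfold findPatterns_alt
  simp only [stream_spec]

-- ===== VERDICT (by name: the statement is the Claim_ definition above) =====
theorem findPatterns_spec : Claim_equal_findPatterns := by
  intro seeds _
  unfold Spec_findPatterns
  rw [A_core, B_core]
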